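-- pv_equiv track=rewrite | github.com/UNKNOWNAR/PythonProgram | pythonProject/Code/TrainStationHop.py | TwoHop
-- ===== SOURCE A (Python) =====
-- def TwoHop(dict):
--     n = len(dict)
--     onehop = [[0 for _ in range(n)] for _ in range(n)]
--     for i in range(n):
--         for j in range(n):
--             onehop[i][j] = dict[i][j]
--             for k in range(n):
--                 if dict[i][k] == 1 and dict[k][j] == 1:
--                     onehop[i][j] = 1
--     n = len(onehop)
--     twohop = [[0 for _ in range(n)] for _ in range(n)]
--     for i in range(n):
--         for j in range(n):
--             twohop[i][j] = onehop[i][j]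
--             for k in range(n):
--                 if onehop[i][k] ==1 and onehop[k][j]==1:
--                    twohop[i][j] = 1
--     return twohop
-- ===== SOURCE B (Python) =====
-- def TwoHop(dict):
--     n = len(dict)
--     res = []
--     for i in range(n):
--         base = [dict[i][v] == 1 for v in range(n)]
--         cur = base
--         for _ in range(3):
--             cur = [base[v] or any(cur[u] and dict[u][v] == 1 for u in range(n))
--                    for v in range(n)]
--         res.append([1 if cur[j] else dict[i][j] for j in range(n)])
--     return res
-- ===== Notes on version B (the rewrite author's own statement) =====
-- stated objective: alternative
-- what changed: Replaces A's two value-preserving O(n^3) matrix self-compositions (onehop, then twohop) by a per-source boolean reachability row vector relaxed three times (marking targets reachable by a directed path of length 1..4 over cells equal to 1), overlaying 1s onto the original row once at the end.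
-- outside the precondition, e.g. on TwoHop([[1, 0], [1]]): A raises IndexError, B raises IndexError
import Mathlib
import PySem

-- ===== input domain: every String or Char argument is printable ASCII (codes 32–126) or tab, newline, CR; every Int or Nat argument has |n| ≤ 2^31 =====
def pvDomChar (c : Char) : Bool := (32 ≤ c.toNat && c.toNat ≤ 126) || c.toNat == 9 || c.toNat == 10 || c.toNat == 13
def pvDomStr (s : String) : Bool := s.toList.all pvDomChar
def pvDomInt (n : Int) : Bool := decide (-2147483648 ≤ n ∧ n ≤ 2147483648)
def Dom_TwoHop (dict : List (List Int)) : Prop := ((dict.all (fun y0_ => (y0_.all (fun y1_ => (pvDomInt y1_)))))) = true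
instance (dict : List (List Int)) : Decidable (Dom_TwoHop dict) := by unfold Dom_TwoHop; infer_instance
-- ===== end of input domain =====

-- B is an alternative algorithm: per-source boolean reachability vector relaxed three times
-- (paths of length 1..4) instead of A's two value-preserving matrix self-compositions.

-- shared indexing helper: m[i][j] (in-range on every input admitted by Pre_; 0 default otherwise)
def pvGet (d : List (List Int)) (i j : Nat) : Int := (d.getD i []).getD j 0

-- ===== PORT A =====
-- A's two triple-loop passes are the SAME block applied twice (second with n = len(onehop));
-- pvSquareA is that block: cell starts as m[i][j], the k-loop overwrites it with 1 on a hit.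
def pvSquareA (d : List (List Int)) : List (List Int) :=
  (List.range d.length).map (fun i => (List.range d.length).map (fun j =>
    (List.range d.length).foldl
      (fun acc k => if pvGet d i k = 1 ∧ pvGet d k j = 1 then 1 else acc)
      (pvGet d i j)))

def TwoHop (dict : List (List Int)) : List (List Int) :=
  pvSquareA (pvSquareA dict)

-- ===== PORT B =====
-- one relaxation step of the reachability row vector (Source B's inner list comprehension)
def pvStepB (d : List (List Int)) (base cur : List Bool) : List Bool :=
  (List.range d.length).map (fun v =>
    base.getD v false ||
      (List.range d.length).any (fun u => cur.getD u false && decide (pvGet d u v = 1)))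

def TwoHop_alt (dict : List (List Int)) : List (List Int) :=
  (List.range dict.length).map (fun i =>
    let base := (List.range dict.length).map (fun v => decide (pvGet dict i v = 1))
    let cur := (List.range 3).foldl (fun cur _ => pvStepB dict base cur) base
    (List.range dict.length).map (fun j =>
      if cur.getD j false then (1 : Int) else pvGet dict i j))

-- ===== PRECONDITION & SPEC =====
-- Pre_ excludes ragged inputs with a row shorter than the matrix, on which Python A raises IndexError.
def Pre_TwoHop (dict : List (List Int)) : Prop := ∀ row ∈ dict, dict.length ≤ row.length
instance (dict : List (List Int)) : Decidable (Pre_TwoHop dict) := by unfold Pre_TwoHop; infer_instance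
def pvWitness_TwoHop : List (List Int) := [[1, 0], [0, 1]]

def Spec_TwoHop (dict : List (List Int)) (out : List (List Int)) : Prop := out = TwoHop_alt dict
instance (dict : List (List Int)) (out : List (List Int)) : Decidable (Spec_TwoHop dict out) := by unfold Spec_TwoHop; infer_instance

-- ===== CLAIM (what is proved, stated in full; the proofs are below) =====
def Claim_equal_TwoHop : Prop := ∀ (dict : List (List Int)), Dom_TwoHop dict → Pre_TwoHop dict → Spec_TwoHop dict (TwoHop dict)

-- ===== LEMMAS AND PROOFS =====

-- "there is an edge": the cell equals 1
def pvE (d : List (List Int)) (a b : Nat) : Prop := pvGet d a b = 1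

-- pvR d n m a b: a directed path from a to b of length 1..m whose intermediate nodes are < n
def pvR (d : List (List Int)) (n : Nat) : Nat → Nat → Nat → Prop
  | 0 => fun _ _ => False
  | m + 1 => fun a b => pvE d a b ∨ ∃ u, u < n ∧ pvR d n m a u ∧ pvE d u b

-- value of one cell of pvSquareA, in closed form
def pvOhCell (d : List (List Int)) (n a b : Nat) : Int :=
  if ∃ k, k < n ∧ pvGet d a k = 1 ∧ pvGet d k b = 1 then 1 else pvGet d a b

theorem pv_getD_map_range {α : Type} (f : Nat → α) (n k : Nat) (h : k < n) (dflt : α) :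
    ((List.range n).map f).getD k dflt = f k := by
  simp [List.getD_eq_getElem?_getD, h]

theorem pv_foldl_if_one (p : Nat → Prop) [DecidablePred p] (n : Nat) (init : Int) :
    (List.range n).foldl (fun acc k => if p k then 1 else acc) init
      = if ∃ k, k < n ∧ p k then 1 else init := by
  induction n with
  | zero => simp
  | succ n ih =>
    rw [List.range_succ, List.foldl_append, ih]
    have hiff : (∃ k, k < n + 1 ∧ p k) ↔ (∃ k, k < n ∧ p k) ∨ p n := by
      constructor
      · rintro ⟨k, hk, hpk⟩
        rcases Nat.lt_succ_iff_lt_or_eq.1 hk with h | h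
        · exact Or.inl ⟨k, h, hpk⟩
        · exact Or.inr (h ▸ hpk)
      · rintro (⟨k, hk, hpk⟩ | hpn)
        · exact ⟨k, Nat.lt_succ_of_lt hk, hpk⟩
        · exact ⟨n, Nat.lt_succ_self n, hpn⟩
    simp only [List.foldl_cons, List.foldl_nil]
    by_cases hp : p n
    · rw [if_pos hp, if_pos (hiff.2 (Or.inr hp))]
    · rw [if_neg hp]
      by_cases he : ∃ k, k < n ∧ p k
      · rw [if_pos he, if_pos (hiff.2 (Or.inl he))]
      · rw [if_neg he, if_neg (fun h => (hiff.1 h).elim he hp)]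

theorem pvSquareA_length (d : List (List Int)) : (pvSquareA d).length = d.length := by
  simp [pvSquareA]

theorem pvSquareA_get (d : List (List Int)) (i j : Nat) (hi : i < d.length)
    (hj : j < d.length) : pvGet (pvSquareA d) i j = pvOhCell d d.length i j := by
  have h1 : (pvSquareA d).getD i [] = (List.range d.length).map (fun j =>
      (List.range d.length).foldl
        (fun acc k => if pvGet d i k = 1 ∧ pvGet d k j = 1 then 1 else acc)
        (pvGet d i j)) := by
    unfold pvSquareA
    exact pv_getD_map_range _ _ _ hi _
  show ((pvSquareA d).getD i []).getD j 0 = _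
  rw [h1, pv_getD_map_range _ _ _ hj,
    pv_foldl_if_one (fun k => pvGet d i k = 1 ∧ pvGet d k j = 1)]
  rfl

theorem pvOh1_iff (d : List (List Int)) (n a b : Nat) :
    pvOhCell d n a b = 1 ↔ pvR d n 2 a b := by
  unfold pvOhCell
  constructor
  · intro h
    by_cases hc : ∃ k, k < n ∧ pvGet d a k = 1 ∧ pvGet d k b = 1
    · obtain ⟨k, hk, h1, h2⟩ := hc
      exact Or.inr ⟨k, hk, Or.inl h1, h2⟩
    · rw [if_neg hc] at h
      exact Or.inl h
  · rintro (h | ⟨u, hu, (h1 | ⟨w, _, hf, _⟩), h2⟩)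
    · by_cases hc : ∃ k, k < n ∧ pvGet d a k = 1 ∧ pvGet d k b = 1
      · rw [if_pos hc]
      · rw [if_neg hc]; exact h
    · rw [if_pos ⟨u, hu, h1, h2⟩]
    · exact absurd hf (by exact fun h => h.elim)

theorem pv_notR2 (d : List (List Int)) (n a b : Nat) (h : ¬ pvR d n 2 a b) :
    pvOhCell d n a b = pvGet d a b := by
  unfold pvOhCell
  rw [if_neg]
  rintro ⟨k, hk, h1, h2⟩
  exact h (Or.inr ⟨k, hk, Or.inl h1, h2⟩)

theorem pvR4_iff (d : List (List Int)) (n a b : Nat) :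
    pvR d n 4 a b ↔ (∃ k, k < n ∧ pvR d n 2 a k ∧ pvR d n 2 k b) ∨ pvR d n 2 a b := by
  simp only [pvR, false_and, exists_const, and_false, or_false]
  constructor
  · rintro (h | ⟨u, hu, (h1 | ⟨w, hw, (h2 | ⟨v, hv, h3, h4⟩), h5⟩), h6⟩)
    · exact Or.inr (Or.inl h)
    · exact Or.inr (Or.inr ⟨u, hu, h1, h6⟩)
    · exact Or.inl ⟨u, hu, Or.inr ⟨w, hw, h2, h5⟩, Or.inl h6⟩
    · exact Or.inl ⟨w, hw, Or.inr ⟨v, hv, h3, h4⟩, Or.inr ⟨u, hu, h5, h6⟩⟩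
  · rintro (⟨k, hk, (h1 | ⟨v, hv, h2, h3⟩), (h4 | ⟨u, hu, h5, h6⟩)⟩ | (h | ⟨u, hu, h1, h2⟩))
    · exact Or.inr ⟨k, hk, Or.inl h1, h4⟩
    · exact Or.inr ⟨u, hu, Or.inr ⟨k, hk, Or.inl h1, h5⟩, h6⟩
    · exact Or.inr ⟨k, hk, Or.inr ⟨v, hv, Or.inl h2, h3⟩, h4⟩
    · exact Or.inr ⟨u, hu, Or.inr ⟨k, hk, Or.inr ⟨v, hv, h2, h3⟩, h5⟩, h6⟩
    · exact Or.inl h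
    · exact Or.inr ⟨u, hu, Or.inl h1, h2⟩

theorem pvStepB_getD (d : List (List Int)) (base cur : List Bool) (P : Nat → Prop) (i : Nat)
    (hbase : ∀ v, v < d.length → (base.getD v false = true ↔ pvE d i v))
    (hcur : ∀ u, u < d.length → (cur.getD u false = true ↔ P u))
    (v : Nat) (hv : v < d.length) :
    ((pvStepB d base cur).getD v false = true
      ↔ pvE d i v ∨ ∃ u, u < d.length ∧ P u ∧ pvE d u v) := by
  unfold pvStepB
  rw [pv_getD_map_range _ _ _ hv]
  simp only [Bool.or_eq_true, List.any_eq_true, List.mem_range, Bool.and_eq_true,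
    decide_eq_true_eq]
  rw [hbase v hv]
  constructor
  · rintro (h | ⟨u, hu, hc, he⟩)
    · exact Or.inl h
    · exact Or.inr ⟨u, hu, (hcur u hu).1 hc, he⟩
  · rintro (h | ⟨u, hu, hp, he⟩)
    · exact Or.inl h
    · exact Or.inr ⟨u, hu, (hcur u hu).2 hp, he⟩

theorem pvCurB (d : List (List Int)) (i : Nat) (t : Nat) (v : Nat) (hv : v < d.length) :
    (((List.range t).foldl (fun c _ => pvStepB d ((List.range d.length).map (fun v => decide (pvGet d i v = 1))) c)
        ((List.range d.length).map (fun v => decide (pvGet d i v = 1)))).getD v false = true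
      ↔ pvR d d.length (t + 1) i v) := by
  have hbase : ∀ w, w < d.length →
      (((List.range d.length).map (fun v => decide (pvGet d i v = 1))).getD w false = true
        ↔ pvE d i w) := by
    intro w hw
    rw [pv_getD_map_range _ _ _ hw]
    simp [pvE]
  induction t generalizing v with
  | zero =>
    simp only [List.range_zero, List.foldl_nil]
    rw [hbase v hv]
    constructor
    · intro h; exact Or.inl h
    · rintro (h | ⟨u, _, hf, _⟩)
      · exact h
      · exact absurd hf (by exact fun h => h.elim)
  | succ t ih =>
    rw [List.range_succ, List.foldl_append]
    simp only [List.foldl_cons, List.foldl_nil]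
    exact pvStepB_getD d _ _ (pvR d d.length (t + 1) i) i hbase (fun u hu => ih u hu) v hv

theorem pv_cell_eq (d : List (List Int)) (i j : Nat) (hi : i < d.length)
    (hj : j < d.length) :
    (List.range d.length).foldl
        (fun acc k => if pvGet (pvSquareA d) i k = 1 ∧ pvGet (pvSquareA d) k j = 1 then 1 else acc)
        (pvGet (pvSquareA d) i j)
      = (if (((List.range 3).foldl
            (fun cur _ => pvStepB d ((List.range d.length).map (fun v => decide (pvGet d i v = 1))) cur)
            ((List.range d.length).map (fun v => decide (pvGet d i v = 1)))).getD j false)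
          then (1 : Int) else pvGet d i j) := by
  rw [pv_foldl_if_one (fun k => pvGet (pvSquareA d) i k = 1 ∧ pvGet (pvSquareA d) k j = 1)]
  have hcond : (∃ k, k < d.length ∧ pvGet (pvSquareA d) i k = 1 ∧ pvGet (pvSquareA d) k j = 1)
      ↔ (∃ k, k < d.length ∧ pvR d d.length 2 i k ∧ pvR d d.length 2 k j) := by
    constructor
    · rintro ⟨k, hk, h1, h2⟩
      rw [pvSquareA_get d i k hi hk] at h1
      rw [pvSquareA_get d k j hk hj] at h2
      exact ⟨k, hk, (pvOh1_iff d d.length i k).1 h1, (pvOh1_iff d d.length k j).1 h2⟩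
    · rintro ⟨k, hk, h1, h2⟩
      refine ⟨k, hk, ?_, ?_⟩
      · rw [pvSquareA_get d i k hi hk]; exact (pvOh1_iff d d.length i k).2 h1
      · rw [pvSquareA_get d k j hk hj]; exact (pvOh1_iff d d.length k j).2 h2
  have hcur := pvCurB d i 3 j hj
  by_cases hR : pvR d d.length 4 i j
  · rw [if_pos (hcur.2 hR)]
    rcases (pvR4_iff d d.length i j).1 hR with hq | h2
    · rw [if_pos (hcond.2 hq)]
    · by_cases hq : ∃ k, k < d.length ∧ pvGet (pvSquareA d) i k = 1 ∧ pvGet (pvSquareA d) k j = 1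
      · rw [if_pos hq]
      · rw [if_neg hq, pvSquareA_get d i j hi hj]
        exact (pvOh1_iff d d.length i j).2 h2
  · have h2 : ¬ pvR d d.length 2 i j := fun h => hR ((pvR4_iff d d.length i j).2 (Or.inr h))
    have hq : ¬ ∃ k, k < d.length ∧ pvGet (pvSquareA d) i k = 1 ∧ pvGet (pvSquareA d) k j = 1 :=
      fun h => hR ((pvR4_iff d d.length i j).2 (Or.inl (hcond.1 h)))
    rw [if_neg hq, if_neg (fun h => hR (hcur.1 h)), pvSquareA_get d i j hi hj,
      pv_notR2 d d.length i j h2]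

-- ===== VERDICT (by name: the statement is the Claim_ definition above) =====
theorem TwoHop_spec : Claim_equal_TwoHop := by
  intro d _ _
  show TwoHop d = TwoHop_alt d
  have hlen : (pvSquareA d).length = d.length := pvSquareA_length d
  unfold TwoHop TwoHop_alt
  rw [show pvSquareA (pvSquareA d) = (List.range (pvSquareA d).length).map (fun i =>
      (List.range (pvSquareA d).length).map (fun j =>
        (List.range (pvSquareA d).length).foldl
          (fun acc k => if pvGet (pvSquareA d) i k = 1 ∧ pvGet (pvSquareA d) k j = 1 then 1 else acc)
          (pvGet (pvSquareA d) i j))) from rfl, hlen]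
  refine List.map_congr_left (fun i hi => ?_)
  rw [List.mem_range] at hi
  refine List.map_congr_left (fun j hj => ?_)
  rw [List.mem_range] at hj
  exact pv_cell_eq d i j hi hj
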